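-- pv_equiv track=rewrite | github.com/stephschustermann/python_projects | compare_policies_snaps.py | extract_param_pattern
-- ===== SOURCE A (Python) =====
-- def extract_param_pattern(filename):
--     """Extract parameter pattern from filename (without timestamp)."""
--     # Example: maxReads_100_accessRate_500_dist_Uniform_20260113_183910.txt
--     # Returns: maxReads_100_accessRate_500_dist_Uniform
--
--     parts = filename.replace('.txt', '').split('_')
--
--     # Find where the timestamp starts (typically 8 digits followed by 6 digits)
--     param_parts = []
--     for i, part in enumerate(parts):
--         if len(part) == 8 and part.isdigit():
--             # This is the date part of timestamp
--             break
--         param_parts.append(part)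
--
--     return '_'.join(param_parts)
-- ===== SOURCE B (Python) =====
-- def _split_first(s):
--     """Split s at its first '_': (token, rest) with rest None if no '_'."""
--     for i, c in enumerate(s):
--         if c == '_':
--             return s[:i], s[i + 1:]
--     return s, None
--
--
-- def _scan(s):
--     """None if the first '_'-token of s is an 8-digit timestamp token,
--     otherwise the prefix of s up to (not including) the cut."""
--     tok, rest = _split_first(s)
--     if len(tok) == 8 and tok.isdigit():
--         return None
--     if rest is None:
--         return s
--     tail = _scan(rest)
--     return tok if tail is None else tok + '_' + tail
--
--
-- def extract_param_pattern(filename):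
--     """Extract parameter pattern from filename (without timestamp)."""
--     r = _scan(filename.replace('.txt', ''))
--     return '' if r is None else r
-- ===== Notes on version B (the rewrite author's own statement) =====
-- stated objective: alternative
-- what changed: B replaces A's split-into-a-list-of-parts plus index loop with accumulator list by a direct recursion on the character stream: it peels off the first underscore-delimited token, stops when it is an 8-digit timestamp token, and rebuilds the prefix on the way back, never materialising the parts list.
import Mathlib
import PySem

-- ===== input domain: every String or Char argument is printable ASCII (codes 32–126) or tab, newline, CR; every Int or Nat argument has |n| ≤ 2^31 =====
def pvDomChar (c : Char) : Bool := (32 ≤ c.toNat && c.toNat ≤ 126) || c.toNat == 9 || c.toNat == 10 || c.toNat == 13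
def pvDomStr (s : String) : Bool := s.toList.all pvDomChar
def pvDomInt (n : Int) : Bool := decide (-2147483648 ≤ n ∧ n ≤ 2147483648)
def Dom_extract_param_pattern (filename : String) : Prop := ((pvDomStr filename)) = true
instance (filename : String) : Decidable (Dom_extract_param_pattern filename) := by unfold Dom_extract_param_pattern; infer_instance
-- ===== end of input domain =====

-- B replaces A's split-list-plus-accumulator loop by a direct recursion on the character
-- stream (peel first '_'-token, stop at the 8-digit token, rebuild the prefix); same cost.

-- "len(part) == 8 and part.isdigit()" — the timestamp-token test both Pythons spell inline
def pvIsTS (p : List Char) : Bool := p.length == 8 && PySem.Chars.strIsdigit p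

-- ===== PORT A =====
-- A's loop over the split parts, accumulating param_parts and joining at exit/break
def pvLoopA : List (List Char) → List (List Char) → List Char
  | [], acc => PySem.Chars.join ['_'] acc
  | p :: ps, acc => if pvIsTS p then PySem.Chars.join ['_'] acc else pvLoopA ps (acc ++ [p])

def extract_param_pattern (filename : String) : String :=
  let parts := PySem.Chars.splitOn (PySem.Chars.replace filename.toList ".txt".toList []) ['_']
  String.ofList (pvLoopA parts [])

-- ===== PORT B =====
-- Source B's _split_first: split at the first '_' — (token, rest), rest = none if no '_'
def pvSplitFirst : List Char → List Char × Option (List Char)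
  | [] => ([], none)
  | c :: cs =>
    if c = '_' then ([], some cs)
    else
      let r := pvSplitFirst cs
      (c :: r.1, r.2)

-- termination fact the port below cites: the rest is strictly shorter
theorem pvSplitFirst_rest_length : ∀ (s r : List Char), (pvSplitFirst s).2 = some r → r.length < s.length := by
  intro s
  induction s with
  | nil => intro r h; simp [pvSplitFirst] at h
  | cons c cs ih =>
    intro r h
    by_cases hc : c = '_'
    · simp [pvSplitFirst, hc] at h
      simp [← h]
    · simp [pvSplitFirst, hc] at h
      have := ih _ h
      simp only [List.length_cons]
      omega

-- Source B's _scan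
def pvScan (s : List Char) : Option (List Char) :=
  if pvIsTS (pvSplitFirst s).1 then none
  else
    match h : (pvSplitFirst s).2 with
    | none => some s
    | some rest =>
      match pvScan rest with
      | none => some (pvSplitFirst s).1
      | some tail => some ((pvSplitFirst s).1 ++ '_' :: tail)
termination_by s.length
decreasing_by exact pvSplitFirst_rest_length s rest h

def extract_param_pattern_alt (filename : String) : String :=
  match pvScan (PySem.Chars.replace filename.toList ".txt".toList []) with
  | none => ""
  | some t => String.ofList t

-- ===== PRECONDITION & SPEC =====
def Spec_extract_param_pattern (filename : String) (out : String) : Prop := out = extract_param_pattern_alt filename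
instance (filename : String) (out : String) : Decidable (Spec_extract_param_pattern filename out) := by unfold Spec_extract_param_pattern; infer_instance

-- ===== CLAIM (what is proved, stated in full; the proofs are below) =====
def Claim_equal_extract_param_pattern : Prop := ∀ (filename : String), Dom_extract_param_pattern filename → Spec_extract_param_pattern filename (extract_param_pattern filename)

-- ===== LEMMAS AND PROOFS =====

-- clean recursive model of splitting on a single '_' character
def pvModel : List Char → List (List Char)
  | [] => [[]]
  | c :: rest =>
    if c = '_' then [] :: pvModel rest
    else
      match pvModel rest with
      | [] => [[c]]
      | t :: ts => (c :: t) :: ts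

theorem pvModel_ne_nil (s : List Char) : pvModel s ≠ [] := by
  cases s with
  | nil => simp [pvModel]
  | cons c rest =>
    simp only [pvModel]
    split
    · simp
    · split <;> simp

theorem pvModifyHead_nil_append (l : List (List Char)) : l.modifyHead (fun t => [] ++ t) = l := by
  cases l <;> simp

theorem pvGo_eq : ∀ (fuel : Nat) (l cur : List Char) (acc : List (List Char)), l.length < fuel →
    PySem.Chars.splitOn.go ['_'] fuel l cur acc = acc.reverse ++ (pvModel l).modifyHead (fun t => cur.reverse ++ t) := by
  intro fuel
  induction fuel with
  | zero => intro l cur acc h; omega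
  | succ fuel ih =>
    intro l cur acc h
    cases l with
    | nil => simp [PySem.Chars.splitOn.go, pvModel]
    | cons c rest =>
      by_cases hc : c = '_'
      · subst hc
        have : List.isPrefixOf ['_'] ('_' :: rest) = true := by simp [List.isPrefixOf]
        rw [PySem.Chars.splitOn.go, if_pos this]
        simp only [List.length_cons, List.length_nil, List.drop_succ_cons, List.drop_zero]
        rw [ih rest [] (cur.reverse :: acc) (by simpa using Nat.lt_of_succ_lt_succ h)]
        simp [pvModel]
        cases pvModel rest <;> simp
      · have : List.isPrefixOf ['_'] (c :: rest) = false := by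
          simp [List.isPrefixOf]; exact fun h' => hc h'.symm
        rw [PySem.Chars.splitOn.go, if_neg (by simp [this])]
        rw [ih rest (c :: cur) acc (Nat.lt_of_succ_lt_succ h)]
        have hm := pvModel_ne_nil rest
        cases hrest : pvModel rest with
        | nil => exact absurd hrest hm
        | cons t ts => simp [pvModel, hc, hrest]
  
theorem pvSplitOn_eq_model (s : List Char) : PySem.Chars.splitOn s ['_'] = pvModel s := by
  show PySem.Chars.splitOn.go ['_'] (s.length + 1) s [] [] = _
  rw [pvGo_eq (s.length + 1) s [] [] (Nat.lt_succ_self _)]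
  simpa using pvModifyHead_nil_append (pvModel s)

theorem pvSplitFirst_none : ∀ (s : List Char), (pvSplitFirst s).2 = none → s = (pvSplitFirst s).1 := by
  intro s
  induction s with
  | nil => intro _; simp [pvSplitFirst]
  | cons c cs ih =>
    intro h
    by_cases hc : c = '_'
    · simp [pvSplitFirst, hc] at h
    · simp [pvSplitFirst, hc] at h ⊢
      exact ih h

theorem pvModel_of_none : ∀ (s : List Char), (pvSplitFirst s).2 = none → pvModel s = [(pvSplitFirst s).1] := by
  intro s
  induction s with
  | nil => intro _; simp [pvSplitFirst, pvModel]
  | cons c cs ih =>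
    intro h
    by_cases hc : c = '_'
    · simp [pvSplitFirst, hc] at h
    · simp [pvSplitFirst, hc] at h ⊢
      simp [pvModel, hc, ih h]

theorem pvModel_of_some : ∀ (s r : List Char), (pvSplitFirst s).2 = some r → pvModel s = (pvSplitFirst s).1 :: pvModel r := by
  intro s
  induction s with
  | nil => intro r h; simp [pvSplitFirst] at h
  | cons c cs ih =>
    intro r h
    by_cases hc : c = '_'
    · simp [pvSplitFirst, hc] at h ⊢
      simp [pvModel, ← h]
    · simp [pvSplitFirst, hc] at h ⊢
      simp [pvModel, hc, ih _ h]

theorem pvLoopA_eq : ∀ (parts acc : List (List Char)),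
    pvLoopA parts acc = PySem.Chars.join ['_'] (acc ++ parts.takeWhile (fun p => !pvIsTS p)) := by
  intro parts
  induction parts with
  | nil => intro acc; simp [pvLoopA]
  | cons p ps ih =>
    intro acc
    by_cases hp : pvIsTS p
    · simp [pvLoopA, hp]
    · simp only [pvLoopA, if_neg hp]
      rw [ih]
      simp [hp]

-- join over a nonempty takeWhile list, in the shape the main induction needs
theorem pvJoin_cons (t : List Char) (l : List (List Char)) (hl : l ≠ []) :
    PySem.Chars.join ['_'] (t :: l) = t ++ '_' :: PySem.Chars.join ['_'] l := by
  cases l with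
  | nil => exact absurd rfl hl
  | cons b bs => rw [PySem.Chars.join_cons_cons]; simp

-- the crux: Source B's _scan computes A's join-of-takeWhile
theorem pvScan_eq : ∀ (n : Nat) (s : List Char), s.length ≤ n →
    (pvIsTS (pvSplitFirst s).1 = true → pvScan s = none)
    ∧ (pvIsTS (pvSplitFirst s).1 = false →
        pvScan s = some (PySem.Chars.join ['_'] ((pvModel s).takeWhile (fun p => !pvIsTS p)))) := by
  intro n
  induction n with
  | zero =>
    intro s hs
    have hnil : s = [] := List.eq_nil_of_length_eq_zero (Nat.le_zero.mp hs)
    subst hnil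
    refine ⟨fun h => ?_, fun h => ?_⟩
    · exact absurd h (by simp [pvSplitFirst, pvIsTS])
    · rw [pvScan]
      simp [pvSplitFirst, pvModel, pvIsTS, PySem.Chars.join_singleton]
  | succ n ih =>
    intro s hs
    constructor
    · intro h; rw [pvScan, if_pos h]
    · intro h
      rw [pvScan, if_neg (by simp [h])]
      split
      next hsp =>
        have hfull := pvSplitFirst_none s hsp
        rw [pvModel_of_none s hsp]
        rw [← hfull] at h
        simp [List.takeWhile, h, PySem.Chars.join_singleton, ← hfull]
      next rest hsp =>
        have hlen : rest.length ≤ n := by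
          have := pvSplitFirst_rest_length s rest hsp
          omega
        have ihr := ih rest hlen
        rw [pvModel_of_some s rest hsp]
        rw [List.takeWhile_cons, if_pos (by simp [h])]
        cases hfr : pvIsTS (pvSplitFirst rest).1 with
        | true =>
          rw [ihr.1 hfr]
          -- first token of rest is a timestamp: takeWhile over pvModel rest is empty
          have htw : (pvModel rest).takeWhile (fun p => !pvIsTS p) = [] := by
            cases hsp2 : (pvSplitFirst rest).2 with
            | none =>
              rw [pvModel_of_none rest hsp2]
              simp [List.takeWhile, hfr]
            | some r2 =>
              rw [pvModel_of_some rest r2 hsp2]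
              simp [hfr]
          rw [htw]
          simp [PySem.Chars.join_singleton]
        | false =>
          rw [ihr.2 hfr]
          have htw : (pvModel rest).takeWhile (fun p => !pvIsTS p) ≠ [] := by
            cases hsp2 : (pvSplitFirst rest).2 with
            | none =>
              rw [pvModel_of_none rest hsp2]
              simp [List.takeWhile, hfr]
            | some r2 =>
              rw [pvModel_of_some rest r2 hsp2]
              simp [hfr]
          rw [pvJoin_cons _ _ htw]

-- ===== VERDICT (by name: the statement is the Claim_ definition above) =====
theorem extract_param_pattern_spec : Claim_equal_extract_param_pattern := by
  intro filename _
  unfold Spec_extract_param_pattern extract_param_pattern extract_param_pattern_alt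
  set s := PySem.Chars.replace filename.toList ".txt".toList [] with hs
  rw [pvSplitOn_eq_model]
  show String.ofList (pvLoopA (pvModel s) []) = _
  rw [pvLoopA_eq]
  have h := pvScan_eq s.length s (Nat.le_refl _)
  cases hts : pvIsTS (pvSplitFirst s).1 with
  | true =>
    rw [h.1 hts]
    have htw : (pvModel s).takeWhile (fun p => !pvIsTS p) = [] := by
      cases hsp : (pvSplitFirst s).2 with
      | none =>
        rw [pvModel_of_none s hsp]
        simp [List.takeWhile, hts]
      | some r =>
        rw [pvModel_of_some s r hsp]
        simp [hts]
    rw [htw]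
    rfl
  | false =>
    rw [h.2 hts]
    simp
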